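-- pv_equiv track=rewrite | github.com/krishnajanolia1994/data-strucure-algo | Python/met.py | solution
-- ===== SOURCE A (Python) =====
-- def solution(S):
--     from collections import Counter
--
--     digit_count = Counter(S)
--
--     left_half = []
--     middle = ""
--
--     for digit in "9876543210":
--         count = digit_count[digit]
--
--         if count > 0:
--             if count % 2 == 1:
--                 middle = max(middle, digit)
--
--             left_half.append(digit * (count // 2))
--
--     left_half = ''.join(left_half)
--
--     palindrome = left_half + middle + left_half[::-1]
--
--     return palindrome.lstrip('0') or '0'
-- ===== SOURCE B (Python) =====
-- def solution(S):
--     # Sort the digit characters of S in descending order, then build the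
--     # palindrome halves from maximal runs of equal digits in one scan.
--     chars = sorted([c for c in S if c in "0123456789"], reverse=True)
--     n = len(chars)
--     left_parts = []
--     middle = ""
--     i = 0
--     while i < n:
--         j = i
--         while j < n and chars[j] == chars[i]:
--             j += 1
--         run = j - i
--         left_parts.append(chars[i] * (run // 2))
--         if run % 2 == 1 and middle == "":
--             middle = chars[i]
--         i = j
--     left = ''.join(left_parts)
--     pal = left + middle + left[::-1]
--     return pal.lstrip('0') or '0'
-- ===== Notes on version B (the rewrite author's own statement) =====
-- stated objective: alternative
-- what changed: Replaces the Counter-over-all-of-S plus fixed descending digit loop with a filter-then-sort of the digit characters and a single two-index run-length scan over the sorted list (first odd run supplies the middle digit).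
import Mathlib
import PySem

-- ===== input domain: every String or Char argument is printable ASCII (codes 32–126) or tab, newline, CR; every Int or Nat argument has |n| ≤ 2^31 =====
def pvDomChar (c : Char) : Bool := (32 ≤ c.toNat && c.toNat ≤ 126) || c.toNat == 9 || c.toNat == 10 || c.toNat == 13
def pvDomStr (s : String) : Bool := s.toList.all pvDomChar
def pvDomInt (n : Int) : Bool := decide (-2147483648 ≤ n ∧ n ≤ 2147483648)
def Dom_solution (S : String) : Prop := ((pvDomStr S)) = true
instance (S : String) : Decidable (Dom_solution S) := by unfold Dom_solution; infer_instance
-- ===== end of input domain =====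

-- B reimplements A by sorting the digit characters descending and doing one run-length
-- scan, instead of a Counter plus a fixed loop over "9876543210" (objective: alternative).

-- ===== PORT A =====

-- max(a, b) on Python strings: b iff a < b (lexicographic on code points)
def pyStrMax (a b : List Char) : List Char := if PySem.Chars.strLt a b then b else a

-- the body of A's 'for digit in "9876543210"' loop
def pvStep (digit_count : PySem.Dict Char Int) (acc : List Char × List Char)
    (digit : Char) : List Char × List Char :=
  let count : Int := digit_count.getD digit 0
  if count > 0 then
    (acc.1 ++ List.replicate (PySem.Int.floordiv count 2).toNat digit,  -- digit * (count // 2); count ≥ 0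
     if PySem.Int.mod count 2 == 1 then pyStrMax acc.2 [digit] else acc.2)
  else acc

def solution (S : String) : String :=
  let digit_count := PySem.Dict.counter S.toList
  let r := "9876543210".toList.foldl (pvStep digit_count) ([], [])
  let left_half := r.1
  let palindrome := left_half ++ r.2 ++ left_half.reverse  -- left_half[::-1] is reverse (PySem.List.slice?_none_none_neg_one)
  let res := palindrome.dropWhile (· == '0')               -- .lstrip('0'): drop leading '0's, exact
  if res.isEmpty then "0" else String.ofList res           -- … or '0'

-- ===== PORT B =====

-- the two-index while loops of Source B: each maximal run of equal chars is one step
def runScan : List Char → List Char × List Char → List Char × List Char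
  | [], acc => acc
  | c :: rest, acc =>
    let run := 1 + (rest.takeWhile (· == c)).length        -- inner while: j - i = length of the maximal run
    runScan (rest.dropWhile (· == c))
      (acc.1 ++ List.replicate (run / 2) c,
       if run % 2 == 1 && acc.2.isEmpty then [c] else acc.2)
termination_by cs => cs.length
decreasing_by
  simp only [List.length_cons]
  exact Nat.lt_succ_of_le (List.length_dropWhile_le _ _)

def solution_alt (S : String) : String :=
  -- c in "0123456789" for a single char is membership among those chars (exact)
  let chars := PySem.List.sorted
    (S.toList.filter (fun c => "0123456789".toList.contains c)) (fun x => x) true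
  let r := runScan chars ([], [])
  let pal := r.1 ++ r.2 ++ r.1.reverse                     -- left[::-1] is reverse
  let res := pal.dropWhile (· == '0')                      -- .lstrip('0')
  if res.isEmpty then "0" else String.ofList res           -- … or '0'

-- ===== PRECONDITION & SPEC =====
def Spec_solution (S : String) (out : String) : Prop := out = solution_alt S
instance (S : String) (out : String) : Decidable (Spec_solution S out) := by unfold Spec_solution; infer_instance

-- ===== CLAIM (what is proved, stated in full; the proofs are below) =====
def Claim_equal_solution : Prop := ∀ (S : String), Dom_solution S → Spec_solution S (solution S)

-- ===== LEMMAS AND PROOFS =====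

-- the digits A iterates over, as an explicit list
def pvDigits : List Char := ['9', '8', '7', '6', '5', '4', '3', '2', '1', '0']

-- the sorted digit characters of l, block by block: count d copies of each digit d, descending
def pvBlocks (l : List Char) (ds : List Char) : List Char :=
  ds.flatMap (fun d => List.replicate (l.count d) d)

lemma mem_pvBlocks {l ds : List Char} {x : Char} (h : x ∈ pvBlocks l ds) : x ∈ ds := by
  rcases List.mem_flatMap.mp h with ⟨d, hd, hx⟩
  rwa [List.eq_of_mem_replicate hx]

lemma strLt_nil_singleton (d : Char) : PySem.Chars.strLt [] [d] = true := by
  simp [PySem.Chars.strLt]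

lemma strLt_singleton_of_gt {m d : Char} (h : d < m) : PySem.Chars.strLt [m] [d] = false := by
  simp only [PySem.Chars.strLt, decide_eq_false_iff_not, List.cons_lt_cons_iff]
  rintro (hlt | ⟨rfl, hnil⟩)
  · exact absurd hlt (lt_asymm h)
  · exact absurd h (lt_irrefl _)

-- takeWhile/dropWhile across a block of equal chars followed by chars ≠ d
lemma takeWhile_dropWhile_block (d : Char) (k : Nat) (rest : List Char)
    (h : ∀ x ∈ rest, x ≠ d) :
    (List.replicate k d ++ rest).takeWhile (· == d) = List.replicate k d ∧
    (List.replicate k d ++ rest).dropWhile (· == d) = rest := by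
  induction k with
  | zero =>
    simp only [List.replicate_zero, List.nil_append]
    cases rest with
    | nil => simp
    | cons x xs =>
      have hx : (x == d) = false := beq_eq_false_iff_ne.mpr (h x (List.mem_cons_self ..))
      simp [hx]
  | succ n ih =>
    simpa [List.replicate_succ, List.takeWhile_cons, List.dropWhile_cons] using ih

-- blocks over a strictly descending digit list are sorted descending
lemma pvBlocks_pairwise (l : List Char) (ds : List Char)
    (h : ds.Pairwise (fun a b => b < a)) :
    (pvBlocks l ds).Pairwise (fun a b : Char => b ≤ a) := by
  induction ds with
  | nil => simp [pvBlocks]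
  | cons d ds ih =>
    rw [List.pairwise_cons] at h
    simp only [pvBlocks, List.flatMap_cons] at *
    apply List.pairwise_append.mpr
    refine ⟨List.pairwise_replicate.mpr (Or.inr le_rfl), ih h.2, ?_⟩
    intro a ha b hb
    rw [List.eq_of_mem_replicate ha]
    exact le_of_lt (h.1 _ (mem_pvBlocks hb))

-- the same membership, in the two spellings of the digit string
lemma mem_digits_iff (a : Char) : a ∈ pvDigits ↔ a ∈ "0123456789".toList := by
  rw [show "0123456789".toList = ['0','1','2','3','4','5','6','7','8','9'] from by decide]
  simp only [pvDigits, List.mem_cons, List.not_mem_nil, or_false]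
  tauto

-- pvBlocks is a permutation of the filtered digit characters
lemma pvBlocks_perm (l : List Char) :
    (pvBlocks l pvDigits).Perm
      (l.filter (fun c => "0123456789".toList.contains c)) := by
  rw [List.perm_iff_count]
  intro a
  by_cases hm : a ∈ pvDigits
  · have hp : ("0123456789".toList.contains a) = true :=
      List.elem_eq_true_of_mem ((mem_digits_iff a).mp hm)
    rw [List.count_filter hp]
    simp only [pvDigits, List.mem_cons, List.not_mem_nil, or_false] at hm
    rcases hm with rfl | rfl | rfl | rfl | rfl | rfl | rfl | rfl | rfl | rfl <;>
      simp [pvBlocks, pvDigits, List.count_append, List.count_replicate]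
  · rw [List.count_eq_zero.mpr (fun hc => hm (mem_pvBlocks hc)),
        List.count_eq_zero.mpr (fun hc => ?_)]
    have := List.mem_filter.mp hc
    exact hm ((mem_digits_iff a).mpr (List.mem_of_elem_eq_true this.2))

-- B's sorted list IS the block decomposition
lemma sorted_eq_pvBlocks (S : String) :
    PySem.List.sorted
      (S.toList.filter (fun c => "0123456789".toList.contains c)) (fun x => x) true
    = pvBlocks S.toList pvDigits := by
  exact List.Perm.eq_of_pairwise (le := fun a b : Char => b ≤ a)
    (fun a b _ _ h1 h2 => le_antisymm h2 h1)
    (PySem.List.sorted_pairwise_rev _ _)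
    (pvBlocks_pairwise _ _ (by decide))
    ((PySem.List.sorted_perm _ _ _).trans (pvBlocks_perm S.toList).symm)

-- core: A's digit loop equals B's run scan over the corresponding blocks
lemma afold_eq_runScan (l : List Char) (ds : List Char)
    (hds : ds.Pairwise (fun a b => b < a))
    (left mid : List Char)
    (hmid : mid = [] ∨ ∃ m, mid = [m] ∧ ∀ d ∈ ds, d < m) :
    ds.foldl (pvStep (PySem.Dict.counter l)) (left, mid)
    = runScan (pvBlocks l ds) (left, mid) := by
  induction ds generalizing left mid with
  | nil => simp [pvBlocks, runScan]
  | cons d ds ih =>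
    rw [List.pairwise_cons] at hds
    have hmid_tail : ∀ mid' : List Char,
        (mid' = mid ∨ mid' = [d]) → mid' = [] ∨ ∃ m, mid' = [m] ∧ ∀ x ∈ ds, x < m := by
      rintro mid' (rfl | rfl)
      · rcases hmid with rfl | ⟨m, rfl, hall⟩
        · exact Or.inl rfl
        · exact Or.inr ⟨m, rfl, fun x hx => hall x (List.mem_cons_of_mem _ hx)⟩
      · exact Or.inr ⟨d, rfl, hds.1⟩
    have hrest : ∀ x ∈ pvBlocks l ds, x ≠ d :=
      fun x hx => ne_of_lt (hds.1 x (mem_pvBlocks hx))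
    have hgetD : (PySem.Dict.counter l).getD d 0 = ((l.count d : Nat) : Int) :=
      PySem.Dict.getD_counter l d
    rw [List.foldl_cons]
    cases hc : l.count d with
    | zero =>
      have hstep : pvStep (PySem.Dict.counter l) (left, mid) d = (left, mid) := by
        simp [pvStep, hgetD, hc]
      have hblk : pvBlocks l (d :: ds) = pvBlocks l ds := by
        rw [pvBlocks, pvBlocks, List.flatMap_cons, hc, List.replicate_zero, List.nil_append]
      rw [hstep, ih hds.2 left mid (hmid_tail mid (Or.inl rfl)), hblk]
    | succ k =>
      have hfd : (PySem.Int.floordiv ((k + 1 : Nat) : Int) 2).toNat = (k + 1) / 2 := by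
        have : PySem.Int.floordiv ((k + 1 : Nat) : Int) 2 = (((k + 1) / 2 : Nat) : Int) := by
          exact_mod_cast PySem.Int.floordiv_natCast (k + 1) 2
        rw [this]; exact Int.toNat_natCast _
      have hmd : (PySem.Int.mod ((k + 1 : Nat) : Int) 2 == 1) = ((k + 1) % 2 == 1) := by
        have : PySem.Int.mod ((k + 1 : Nat) : Int) 2 = (((k + 1) % 2 : Nat) : Int) := by
          exact_mod_cast PySem.Int.mod_natCast (k + 1) 2
        rw [this]
        cases h2 : (k + 1) % 2 == 1 <;> simp_all
      -- the A step at digit d, with middles already matched to B's form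
      have hmids : (if ((k + 1) % 2 == 1) = true then pyStrMax mid [d] else mid)
          = (if ((k + 1) % 2 == 1 && mid.isEmpty) = true then [d] else mid) := by
        rcases hmid with rfl | ⟨m, rfl, hall⟩
        · simp [pyStrMax, strLt_nil_singleton]
        · have : PySem.Chars.strLt [m] [d] = false :=
            strLt_singleton_of_gt (hall d (List.mem_cons_self ..))
          simp [pyStrMax, this]
      have hstep : pvStep (PySem.Dict.counter l) (left, mid) d =
          (left ++ List.replicate ((k + 1) / 2) d,
           if ((k + 1) % 2 == 1 && mid.isEmpty) = true then [d] else mid) := by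
        rw [pvStep]
        simp only [hgetD, hc, hfd, hmd, hmids]
        rw [if_pos (by positivity)]
      -- the run scan consumes exactly this block
      have hblk : pvBlocks l (d :: ds) = d :: (List.replicate k d ++ pvBlocks l ds) := by
        rw [pvBlocks, List.flatMap_cons, hc, List.replicate_succ, List.cons_append]; rfl
      obtain ⟨htw, hdw⟩ := takeWhile_dropWhile_block d k (pvBlocks l ds) hrest
      have hscan : runScan (pvBlocks l (d :: ds)) (left, mid) =
          runScan (pvBlocks l ds)
            (left ++ List.replicate ((k + 1) / 2) d,
             if ((k + 1) % 2 == 1 && mid.isEmpty) = true then [d] else mid) := by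
        rw [hblk, runScan, htw, hdw, List.length_replicate]
        ring_nf
      rw [hstep, hscan]
      exact ih hds.2 _ _ (by
        by_cases ho : ((k + 1) % 2 == 1 && mid.isEmpty) = true
        · rw [if_pos ho]; exact hmid_tail _ (Or.inr rfl)
        · rw [if_neg ho]; exact hmid_tail _ (Or.inl rfl))

-- ===== VERDICT (by name: the statement is the Claim_ definition above) =====
theorem solution_spec : Claim_equal_solution := by
  unfold Claim_equal_solution
  intro S _
  show solution S = solution_alt S
  simp only [solution, solution_alt]
  rw [sorted_eq_pvBlocks S,
      show "9876543210".toList = pvDigits from by decide,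
      afold_eq_runScan S.toList pvDigits (by decide) [] [] (Or.inl rfl)]
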